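-- pv_equiv track=rewrite | github.com/JiahaoZhang2001/Early-diffusion-signals | make_thesis_analysis.py | bfs_from_root
-- ===== SOURCE A (Python) =====
-- from collections import Counter, defaultdict, deque
-- from typing import Dict, List, Tuple, Any
--
-- def bfs_from_root(adj: Dict[str, List[str]], root: str) -> Tuple[List[str], Dict[str, int]]:
--     order = []
--     depth = {}
--     q = deque([root])
--     depth[root] = 0
--     while q:
--         u = q.popleft()
--         order.append(u)
--         for v in adj.get(u, []):
--             if v not in depth:
--                 depth[v] = depth[u] + 1
--                 q.append(v)
--     return order, depth
-- ===== SOURCE B (Python) =====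
-- def bfs_from_root(adj, root):
--     # Level-synchronous BFS: process whole frontier levels instead of a FIFO queue.
--     order = []
--     depth = {root: 0}
--     frontier = [root]
--     while frontier:
--         next_frontier = []
--         for u in frontier:
--             order.append(u)
--             for v in adj.get(u, []):
--                 if v not in depth:
--                     depth[v] = depth[u] + 1
--                     next_frontier.append(v)
--         frontier = next_frontier
--     return order, depth
-- ===== Notes on version B (the rewrite author's own statement) =====
-- stated objective: alternative
-- what changed: Replaces the FIFO-deque BFS with a level-synchronous BFS that processes whole frontier lists level by level, recording depths at discovery time, producing the identical order and depth map.
import Mathlib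
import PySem

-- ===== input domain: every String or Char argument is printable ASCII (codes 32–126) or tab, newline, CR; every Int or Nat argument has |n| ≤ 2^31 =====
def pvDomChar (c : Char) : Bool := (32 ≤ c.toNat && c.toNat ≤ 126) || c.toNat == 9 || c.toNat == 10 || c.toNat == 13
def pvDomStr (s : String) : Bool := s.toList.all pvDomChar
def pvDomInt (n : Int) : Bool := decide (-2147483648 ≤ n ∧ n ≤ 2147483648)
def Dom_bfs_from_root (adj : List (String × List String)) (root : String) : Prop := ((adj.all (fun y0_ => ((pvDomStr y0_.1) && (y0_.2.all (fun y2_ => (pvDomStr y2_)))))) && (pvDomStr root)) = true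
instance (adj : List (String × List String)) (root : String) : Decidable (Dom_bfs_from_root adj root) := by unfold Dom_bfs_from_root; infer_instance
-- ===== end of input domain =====

-- B replaces A's FIFO-queue BFS by a level-synchronous BFS (explicit frontier /
-- next-frontier lists); same traversal order and depths, same cost (objective: alternative).

-- shared helpers: adj.get(u, []) on the association-list dict, and the termination
-- measure ingredients (universe of all adjacency-list entries, count of unvisited ones)
def pvAdjGet (adj : List (String × List String)) (u : String) : List String :=
  (PySem.Dict.mk adj).getD u []

def pvUniv (adj : List (String × List String)) : List String :=
  (adj.map (fun p => p.2)).flatten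

def pvUnvis (adj : List (String × List String)) (d : PySem.Dict String Int) : Nat :=
  (pvUniv adj).countP (fun s => !(d.contains s))

lemma pvMemAdjGet (adj : List (String × List String)) (u x : String)
    (hx : x ∈ pvAdjGet adj u) : x ∈ pvUniv adj := by
  induction adj with
  | nil =>
      have h0 : pvAdjGet [] u = [] := rfl
      rw [h0] at hx; cases hx
  | cons a rest ih =>
      rw [pvAdjGet, PySem.Dict.getD_eq_get?_getD] at hx
      rw [show PySem.Dict.mk (a :: rest) = PySem.Dict.mk ((a.1, a.2) :: rest) by rfl] at hx
      rw [PySem.Dict.get?_mk_cons] at hx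
      simp only [pvUniv, List.map_cons, List.flatten_cons, List.mem_append]
      by_cases h : (a.1 == u) = true
      · simp [h] at hx; exact Or.inl hx
      · simp [h] at hx
        exact Or.inr (ih (by rw [pvAdjGet, PySem.Dict.getD_eq_get?_getD]; simpa using hx))

lemma pvCountP_insert (U : List String) (d : PySem.Dict String Int) (v : String) (w : Int)
    (hU : v ∈ U) (hv : d.contains v = false) :
    U.countP (fun s => !((d.insert v w).contains s)) + 1 ≤ U.countP (fun s => !(d.contains s)) := by
  induction U with
  | nil => cases hU
  | cons a U ih =>
      simp only [List.countP_cons]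
      have himp : ∀ s : String, (!((d.insert v w).contains s)) = true → (!(d.contains s)) = true := by
        intro s hs
        simp only [PySem.Dict.contains_insert, Bool.not_eq_true', Bool.or_eq_false_iff] at hs ⊢
        exact hs.2
      have hmono : U.countP (fun s => !((d.insert v w).contains s)) ≤ U.countP (fun s => !(d.contains s)) :=
        List.countP_mono_left (fun s _ => himp s)
      rcases List.mem_cons.mp hU with h | hmem
      · subst h
        have h2 : (!(d.contains v)) = true := by simp [hv]
        simp [h2]
        omega
      · have hih := ih hmem
        by_cases ha : (!((d.insert v w).contains a)) = true
        · have hb := himp a ha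
          simp [ha, hb]
          omega
        · simp only [Bool.not_eq_true] at ha
          simp [ha]
          split <;> omega

-- ===== PORT A =====
-- Python A: FIFO queue; pop u, append u to order, discover unseen neighbours at depth[u]+1.
-- depth[u] is always present when read (u was enqueued with its depth), so getD u 0 is exact.
def pvStepA (u : String) (acc : List String × PySem.Dict String Int) (v : String) :
    List String × PySem.Dict String Int :=
  if acc.2.contains v then acc
  else (acc.1 ++ [v], acc.2.insert v (acc.2.getD u 0 + 1))

lemma pvFoldA_measure (adj : List (String × List String)) (u : String) :
    ∀ (vs : List String), (∀ x ∈ vs, x ∈ pvUniv adj) → ∀ (q : List String) (d : PySem.Dict String Int),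
      (vs.foldl (pvStepA u) (q, d)).1.length + pvUnvis adj (vs.foldl (pvStepA u) (q, d)).2
        ≤ q.length + pvUnvis adj d := by
  intro vs
  induction vs with
  | nil => intro _ q d; simp
  | cons v vs ih =>
      intro hmem q d
      simp only [List.foldl_cons]
      by_cases hc : d.contains v
      · rw [show pvStepA u (q, d) v = (q, d) by simp [pvStepA, hc]]
        exact ih (fun x hx => hmem x (List.mem_cons_of_mem _ hx)) q d
      · rw [show pvStepA u (q, d) v = (q ++ [v], d.insert v (d.getD u 0 + 1)) by
          simp [pvStepA, hc]]
        have h1 := ih (fun x hx => hmem x (List.mem_cons_of_mem _ hx)) (q ++ [v])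
          (d.insert v (d.getD u 0 + 1))
        have h2 := pvCountP_insert (pvUniv adj) d v (d.getD u 0 + 1)
          (hmem v (List.mem_cons_self ..)) (by simpa using hc)
        simp only [List.length_append, List.length_cons, List.length_nil] at h1
        unfold pvUnvis at *
        omega

def pvLoopA (adj : List (String × List String)) :
    List String → List String → PySem.Dict String Int → List String × PySem.Dict String Int
  | [], order, depth => (order, depth)
  | u :: q, order, depth =>
      let st := (pvAdjGet adj u).foldl (pvStepA u) (q, depth)
      pvLoopA adj st.1 (order ++ [u]) st.2
termination_by q _ depth => q.length + pvUnvis adj depth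
decreasing_by
  have h := pvFoldA_measure adj u (pvAdjGet adj u) (fun x hx => pvMemAdjGet adj u x hx) q depth
  simp only [List.length_cons]
  omega

def bfs_from_root (adj : List (String × List String)) (root : String) :
    List String × (List (String × Int)) :=
  let r := pvLoopA adj [root] [] ((PySem.Dict.empty).insert root 0)
  (r.1, r.2.items)

-- ===== PORT B =====
-- Python B: level-synchronous; inner for-loop over the frontier accumulates next_frontier.
def pvStepB (u : String) (acc : PySem.Dict String Int × List String) (v : String) :
    PySem.Dict String Int × List String :=
  if acc.1.contains v then acc
  else (acc.1.insert v (acc.1.getD u 0 + 1), acc.2 ++ [v])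

def pvLevelB (adj : List (String × List String)) :
    List String → List String → PySem.Dict String Int → List String →
      List String × PySem.Dict String Int × List String
  | [], order, depth, next => (order, depth, next)
  | u :: fs, order, depth, next =>
      let st := (pvAdjGet adj u).foldl (pvStepB u) (depth, next)
      pvLevelB adj fs (order ++ [u]) st.1 st.2

lemma pvFoldB_measure (adj : List (String × List String)) (u : String) :
    ∀ (vs : List String), (∀ x ∈ vs, x ∈ pvUniv adj) → ∀ (d : PySem.Dict String Int) (n : List String),
      (vs.foldl (pvStepB u) (d, n)).2.length + pvUnvis adj (vs.foldl (pvStepB u) (d, n)).1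
        ≤ n.length + pvUnvis adj d := by
  intro vs
  induction vs with
  | nil => intro _ d n; simp
  | cons v vs ih =>
      intro hmem d n
      simp only [List.foldl_cons]
      by_cases hc : d.contains v
      · rw [show pvStepB u (d, n) v = (d, n) by simp [pvStepB, hc]]
        exact ih (fun x hx => hmem x (List.mem_cons_of_mem _ hx)) d n
      · rw [show pvStepB u (d, n) v = (d.insert v (d.getD u 0 + 1), n ++ [v]) by
          simp [pvStepB, hc]]
        have h1 := ih (fun x hx => hmem x (List.mem_cons_of_mem _ hx))
          (d.insert v (d.getD u 0 + 1)) (n ++ [v])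
        have h2 := pvCountP_insert (pvUniv adj) d v (d.getD u 0 + 1)
          (hmem v (List.mem_cons_self ..)) (by simpa using hc)
        simp only [List.length_append, List.length_cons, List.length_nil] at h1
        unfold pvUnvis at *
        omega

lemma pvLevelB_measure (adj : List (String × List String)) :
    ∀ (f order : List String) (depth : PySem.Dict String Int) (next : List String),
      (pvLevelB adj f order depth next).2.2.length + pvUnvis adj (pvLevelB adj f order depth next).2.1
        ≤ next.length + pvUnvis adj depth := by
  intro f
  induction f with
  | nil => intro order depth next; simp [pvLevelB]
  | cons u fs ih =>
      intro order depth next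
      rw [pvLevelB]
      have h1 := ih (order ++ [u]) ((pvAdjGet adj u).foldl (pvStepB u) (depth, next)).1
        ((pvAdjGet adj u).foldl (pvStepB u) (depth, next)).2
      have h2 := pvFoldB_measure adj u (pvAdjGet adj u)
        (fun x hx => pvMemAdjGet adj u x hx) depth next
      omega

def pvOuterB (adj : List (String × List String)) :
    List String → List String → PySem.Dict String Int → List String × PySem.Dict String Int
  | [], order, depth => (order, depth)
  | u :: fs, order, depth =>
      let st := pvLevelB adj (u :: fs) order depth []
      pvOuterB adj st.2.2 st.1 st.2.1
termination_by f _ depth => f.length + pvUnvis adj depth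
decreasing_by
  have h := pvLevelB_measure adj (u :: fs) order depth []
  simp only [List.length_cons, List.length_nil] at h ⊢
  omega

def bfs_from_root_alt (adj : List (String × List String)) (root : String) :
    List String × (List (String × Int)) :=
  let r := pvOuterB adj [root] [] ((PySem.Dict.empty).insert root 0)
  (r.1, r.2.items)

-- ===== PRECONDITION & SPEC =====
def Spec_bfs_from_root (adj : List (String × List String)) (root : String) (out : List String × (List (String × Int))) : Prop := out = bfs_from_root_alt adj root
instance (adj : List (String × List String)) (root : String) (out : List String × (List (String × Int))) : Decidable (Spec_bfs_from_root adj root out) := by unfold Spec_bfs_from_root; infer_instance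

-- ===== CLAIM (what is proved, stated in full; the proofs are below) =====
def Claim_equal_bfs_from_root : Prop := ∀ (adj : List (String × List String)) (root : String), Dom_bfs_from_root adj root → Spec_bfs_from_root adj root (bfs_from_root adj root)

-- ===== LEMMAS AND PROOFS =====

-- A's neighbour fold on queue (f' ++ n) does the same dict updates as B's neighbour fold
-- on next-accumulator n, appending the same freshly discovered vertices.
lemma pvFold_rel (u : String) :
    ∀ (vs q0 n0 : List String) (d : PySem.Dict String Int),
      vs.foldl (pvStepA u) (q0 ++ n0, d)
        = (q0 ++ (vs.foldl (pvStepB u) (d, n0)).2, (vs.foldl (pvStepB u) (d, n0)).1) := by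
  intro vs
  induction vs with
  | nil => intro q0 n0 d; simp
  | cons v vs ih =>
      intro q0 n0 d
      simp only [List.foldl_cons]
      by_cases hc : d.contains v
      · rw [show pvStepA u (q0 ++ n0, d) v = (q0 ++ n0, d) by simp [pvStepA, hc],
            show pvStepB u (d, n0) v = (d, n0) by simp [pvStepB, hc]]
        exact ih q0 n0 d
      · rw [show pvStepA u (q0 ++ n0, d) v
              = (q0 ++ (n0 ++ [v]), d.insert v (d.getD u 0 + 1)) by
            simp [pvStepA, hc],
            show pvStepB u (d, n0) v = (d.insert v (d.getD u 0 + 1), n0 ++ [v]) by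
            simp [pvStepB, hc]]
        exact ih q0 (n0 ++ [v]) (d.insert v (d.getD u 0 + 1))

-- Running A's queue loop on frontier ++ pending-next equals finishing the level with B
-- and continuing A on the produced state.
lemma pvLoopA_level (adj : List (String × List String)) :
    ∀ (f n order : List String) (d : PySem.Dict String Int),
      pvLoopA adj (f ++ n) order d
        = pvLoopA adj (pvLevelB adj f order d n).2.2 (pvLevelB adj f order d n).1
            (pvLevelB adj f order d n).2.1 := by
  intro f
  induction f with
  | nil => intro n order d; simp [pvLevelB]
  | cons u fs ih =>
      intro n order d
      rw [show (u :: fs) ++ n = u :: (fs ++ n) by simp]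
      simp only [pvLoopA]
      rw [pvFold_rel u (pvAdjGet adj u) fs n d]
      rw [pvLevelB]
      exact ih ((pvAdjGet adj u).foldl (pvStepB u) (d, n)).2 (order ++ [u])
        ((pvAdjGet adj u).foldl (pvStepB u) (d, n)).1

lemma pvLoopA_eq_outerB (adj : List (String × List String)) :
    ∀ (f order : List String) (d : PySem.Dict String Int),
      pvLoopA adj f order d = pvOuterB adj f order d := by
  intro f order d
  generalize hn : f.length + pvUnvis adj d = n
  induction n using Nat.strong_induction_on generalizing f order d with
  | _ n ih =>
    match f with
    | [] => rw [pvLoopA, pvOuterB]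
    | u :: fs =>
      have hm := pvLevelB_measure adj (u :: fs) order d []
      have h1 : pvLoopA adj (u :: fs) order d
          = pvLoopA adj (pvLevelB adj (u :: fs) order d []).2.2
              (pvLevelB adj (u :: fs) order d []).1
              (pvLevelB adj (u :: fs) order d []).2.1 := by
        simpa using pvLoopA_level adj (u :: fs) [] order d
      rw [h1]
      simp only [pvOuterB]
      refine ih _ ?_ _ _ _ rfl
      simp only [List.length_cons, List.length_nil] at hm hn
      omega

-- ===== VERDICT (by name: the statement is the Claim_ definition above) =====
theorem bfs_from_root_spec : Claim_equal_bfs_from_root := by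
  intro adj root _
  unfold Spec_bfs_from_root bfs_from_root bfs_from_root_alt
  rw [pvLoopA_eq_outerB]
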